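-- pv_equiv track=rewrite | github.com/dnwls16071/Everyday-Algorithm | 프로그래머스/0/120956. 옹알이 （1）/옹알이 （1）.py | solution
-- ===== SOURCE A (Python) =====
-- from itertools import permutations
--
-- def solution(babbling):
--     answer = 0
--     lst = ["aya", "ye", "woo", "ma"]
--     words = []
--     for i in range(1, 5):
--         for j in permutations(lst, i):
--             words.append(''.join(j))
--
--     for i in babbling:
--         if i in words:
--             answer += 1
--     return answer
-- ===== SOURCE B (Python) =====
-- def solution(babbling):
--     tokens = ("aya", "ye", "woo", "ma")
--     count = 0
--     for word in babbling:
--         rest, used = word, []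
--         while rest:
--             for t in tokens:
--                 if t not in used and rest.startswith(t):
--                     used.append(t)
--                     rest = rest[len(t):]
--                     break
--             else:
--                 break
--         if rest == "" and used:
--             count += 1
--     return count
-- ===== Notes on version B (the rewrite author's own statement) =====
-- stated objective: faster
-- what changed: B parses each word greedily left-to-right into distinct tokens (safe since all four tokens start with different letters) instead of A's building all 64 permutation concatenations and doing a linear membership test against that table.
import Mathlib
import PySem

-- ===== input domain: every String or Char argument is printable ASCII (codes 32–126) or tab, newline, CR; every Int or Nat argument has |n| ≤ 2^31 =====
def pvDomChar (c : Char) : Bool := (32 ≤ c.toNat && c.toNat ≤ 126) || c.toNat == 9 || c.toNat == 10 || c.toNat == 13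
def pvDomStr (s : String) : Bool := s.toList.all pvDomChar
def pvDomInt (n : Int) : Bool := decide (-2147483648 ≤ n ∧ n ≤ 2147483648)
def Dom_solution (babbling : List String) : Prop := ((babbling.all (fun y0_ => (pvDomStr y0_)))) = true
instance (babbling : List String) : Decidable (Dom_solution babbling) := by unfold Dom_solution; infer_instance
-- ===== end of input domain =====

-- B replaces A's "materialise all 64 permutation concatenations, then list-membership test"
-- by a direct greedy left-to-right parse of each word into distinct tokens (objective: faster per-word check, no 64-word table).

-- ===== PORT A =====
def solution (babbling : List String) : Int :=
  let answer : Int := 0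
  let lst : List String := ["aya", "ye", "woo", "ma"]
  let words : List String :=
    (PySem.List.pyRange 1 5 1).foldl (fun words i =>
      (PySem.List.permutations lst i.toNat).foldl
        (fun words j => words ++ [PySem.Str.join "" j]) words) []
  let answer := babbling.foldl
    (fun answer i => if words.contains i then answer + 1 else answer) answer
  answer

-- ===== PORT B =====
def pvTokens : List String := ["aya", "ye", "woo", "ma"]

-- the inner 'for t in tokens: … break / else' — first unused token that is a prefix of rest
def pvStep (used : List String) (rest : List Char) : Option String :=
  pvTokens.find? (fun t => !used.contains t && PySem.Chars.startswith rest t.toList)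

-- the 'while rest:' loop; fuel = rest.length makes it structural (every iteration consumes ≥ 1 char,
-- so the fuel-exhausted branch is never reached from solution_alt)
def pvParse : Nat → List Char → List String → List Char × List String
  | _, [], used => ([], used)
  | 0, rest, used => (rest, used)
  | fuel+1, rest, used =>
    match pvStep used rest with
    | none => (rest, used)
    | some t => pvParse fuel (rest.drop t.toList.length) (used ++ [t])

def solution_alt (babbling : List String) : Int :=
  babbling.foldl (fun count word =>
    let r := pvParse word.toList.length word.toList []
    if r.1.isEmpty && !r.2.isEmpty then count + 1 else count) 0

-- ===== PRECONDITION & SPEC =====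
def Spec_solution (babbling : List String) (out : Int) : Prop := out = solution_alt babbling
instance (babbling : List String) (out : Int) : Decidable (Spec_solution babbling out) := by unfold Spec_solution; infer_instance

-- ===== CLAIM (what is proved, stated in full; the proofs are below) =====
def Claim_equal_solution : Prop := ∀ (babbling : List String), Dom_solution babbling → Spec_solution babbling (solution babbling)

-- ===== LEMMAS AND PROOFS =====

-- A's word table, as a standalone term (definitionally the 'words' let of `solution`)
def pvWordsA : List String :=
  (PySem.List.pyRange 1 5 1).foldl (fun words i =>
    (PySem.List.permutations ["aya", "ye", "woo", "ma"] i.toNat).foldl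
      (fun words j => words ++ [PySem.Str.join "" j]) words) []

theorem pvTokLen : ∀ t ∈ pvTokens, 2 ≤ t.toList.length := by decide

theorem pvJoinEmpty (l : List (List Char)) : PySem.Chars.join [] l = l.flatten := by
  induction l with
  | nil => simp [PySem.Chars.join_nil]
  | cons x t ih =>
    cases t with
    | nil => simp [PySem.Chars.join_singleton]
    | cons y u => simp [PySem.Chars.join_cons_cons] at *; simp [ih]

theorem pvParseSound : ∀ (fuel : Nat) (rest : List Char) (used : List String),
    rest.length ≤ fuel → (pvParse fuel rest used).1 = [] →
    ∃ ts : List String, ts.Nodup ∧ (∀ t ∈ ts, t ∈ pvTokens ∧ used.contains t = false) ∧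
      rest = (ts.map String.toList).flatten ∧ (pvParse fuel rest used).2 = used ++ ts := by
  intro fuel
  induction fuel with
  | zero =>
    intro rest used hle _
    have hr : rest = [] := by cases rest <;> simp_all
    subst hr
    exact ⟨[], by simp, by simp, by simp, by simp [pvParse]⟩
  | succ n ih =>
    intro rest used hle h1
    cases rest with
    | nil => exact ⟨[], by simp, by simp, by simp, by simp [pvParse]⟩
    | cons c cs =>
      simp only [pvParse] at h1 ⊢
      cases hs : pvStep used (c :: cs) with
      | none => rw [hs] at h1; simp at h1
      | some t =>
        rw [hs] at h1
        dsimp only at h1 ⊢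
        have hfind : List.find? (fun t => !used.contains t && PySem.Chars.startswith (c :: cs) t.toList) pvTokens = some t := by
          simpa [pvStep] using hs
        have hmem : t ∈ pvTokens := List.mem_of_find?_eq_some hfind
        have hpred := List.find?_some hfind
        rw [Bool.and_eq_true] at hpred
        have hused : used.contains t = false := by
          rcases hpred with ⟨h, _⟩; simpa using h
        have hprefix : t.toList <+: (c :: cs) := (PySem.Chars.startswith_iff _ _).mp hpred.2
        obtain ⟨u, hu⟩ := hprefix
        have hdrop : (c :: cs).drop t.toList.length = u := by
          rw [← hu]; exact List.drop_left
        have hlen2 : 2 ≤ t.toList.length := pvTokLen t hmem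
        have hlenu : u.length ≤ n := by
          have h5 : t.toList.length + u.length = cs.length + 1 := by
            have h4 := congrArg List.length hu
            simpa using h4
          have h6 : cs.length + 1 ≤ n + 1 := by simpa using hle
          omega
        rw [hdrop] at h1 ⊢
        obtain ⟨ts, hnd, hall, heq, h2⟩ := ih u (used ++ [t]) hlenu h1
        refine ⟨t :: ts, ?_, ?_, ?_, ?_⟩
        · rw [List.nodup_cons]
          refine ⟨fun hmem' => ?_, hnd⟩
          have := (hall t hmem').2
          simp at this
        · intro x hx
          rcases List.mem_cons.mp hx with h | h
          · subst h; exact ⟨hmem, hused⟩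
          · have := hall x h
            refine ⟨this.1, ?_⟩
            have h2' := this.2
            simp at h2'
            simp [h2'.1]
        · simp [← hu, heq]
        · rw [h2]; simp
  
theorem pvWordsParse : ∀ w ∈ pvWordsA,
    ((pvParse w.toList.length w.toList []).1.isEmpty
      && !(pvParse w.toList.length w.toList []).2.isEmpty) = true := by decide

theorem pvMemJoin : ∀ ts : List String, ts ≠ [] → ts.Nodup → (∀ t ∈ ts, t ∈ pvTokens) →
    pvWordsA.contains (PySem.Str.join "" ts) = true := by
  intro ts hne hnd hsub
  have hlen : ts.length ≤ 4 := by
    have h := (List.subperm_of_subset hnd (fun x hx => hsub x hx)).length_le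
    simpa [pvTokens] using h
  match ts, hne with
  | [a], _ =>
    have ha := hsub a (by simp)
    simp only [pvTokens] at ha
    fin_cases ha <;> decide
  | [a, b], _ =>
    have ha := hsub a (by simp); have hb := hsub b (by simp)
    simp only [pvTokens] at ha hb
    revert hnd
    fin_cases ha <;> fin_cases hb <;> decide
  | [a, b, c], _ =>
    have ha := hsub a (by simp); have hb := hsub b (by simp); have hc := hsub c (by simp)
    simp only [pvTokens] at ha hb hc
    revert hnd
    fin_cases ha <;> fin_cases hb <;> fin_cases hc <;> decide
  | [a, b, c, d], _ =>
    have ha := hsub a (by simp); have hb := hsub b (by simp)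
    have hc := hsub c (by simp); have hd := hsub d (by simp)
    simp only [pvTokens] at ha hb hc hd
    revert hnd
    fin_cases ha <;> fin_cases hb <;> fin_cases hc <;> fin_cases hd <;> decide
  | a :: b :: c :: d :: e :: rest, _ => simp at hlen; omega

theorem pvKey (w : String) :
    pvWordsA.contains w =
      ((pvParse w.toList.length w.toList []).1.isEmpty
        && !(pvParse w.toList.length w.toList []).2.isEmpty) := by
  by_cases hc : pvWordsA.contains w = true
  · rw [hc]
    exact (pvWordsParse w (by simpa using hc)).symm
  · rw [Bool.not_eq_true] at hc
    rw [hc]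
    by_contra hr
    have hr' : ((pvParse w.toList.length w.toList []).1.isEmpty
        && !(pvParse w.toList.length w.toList []).2.isEmpty) = true := by
      cases h : ((pvParse w.toList.length w.toList []).1.isEmpty
        && !(pvParse w.toList.length w.toList []).2.isEmpty) <;> simp_all
    rw [Bool.and_eq_true] at hr'
    have h1 : (pvParse w.toList.length w.toList []).1 = [] := by
      simpa [List.isEmpty_iff] using hr'.1
    obtain ⟨ts, hnd, hall, heq, h2⟩ := pvParseSound w.toList.length w.toList [] le_rfl h1
    have htsne : ts ≠ [] := by
      intro h; subst h
      rw [h2] at hr'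
      simp at hr'
    have hw : w = PySem.Str.join "" ts := by
      apply String.toList_inj.mp
      rw [PySem.Str.toList_join]
      have : ("" : String).toList = [] := rfl
      rw [this, pvJoinEmpty]
      exact heq
    have := pvMemJoin ts htsne hnd (fun t ht => (hall t ht).1)
    rw [← hw] at this
    rw [hc] at this
    exact Bool.false_ne_true this

-- ===== VERDICT (by name: the statement is the Claim_ definition above) =====
theorem solution_spec : Claim_equal_solution := by
  intro babbling _
  unfold Spec_solution
  show babbling.foldl (fun answer i => if pvWordsA.contains i then answer + 1 else answer) 0
      = solution_alt babbling
  unfold solution_alt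
  apply PySem.List.foldl_congr_mem
  intro acc w _
  rw [pvKey w]
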